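-- pv_equiv track=rewrite | github.com/marinegor/dummy_weather_push | weather.py | condition_pairs_to_string
-- ===== SOURCE A (Python) =====
-- from typing import List, Tuple
-- import itertools
--
-- def condition_pairs_to_string(arr: Tuple[int, bool]) -> str:
--     good_hours = [h for h, condition in arr if condition == True]
--
--     pairs = []
--     for a, b in itertools.groupby(enumerate(good_hours),
--             lambda pair: pair[1] - pair[0]):
--         b = list(b)
--         pairs.append((b[0][1], b[-1][1]))
--
--     rv = []
--     for t0, t1 in pairs:
--         if t0 == t1:
--             rv.append(f'{t0}')
--         else:
--             rv.append(f'{t0}-{t1}')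
--     return ', '.join(rv)
-- ===== SOURCE B (Python) =====
-- def condition_pairs_to_string(arr):
--     good_hours = [h for h, condition in arr if condition == True]
--     if not good_hours:
--         return ''
--     rv = []
--     start = prev = good_hours[0]
--     for h in good_hours[1:]:
--         if h != prev + 1:
--             rv.append(f'{start}' if start == prev else f'{start}-{prev}')
--             start = h
--         prev = h
--     rv.append(f'{start}' if start == prev else f'{start}-{prev}')
--     return ', '.join(rv)
-- ===== Notes on version B (the rewrite author's own statement) =====
-- stated objective: simpler
-- what changed: Replaces the enumerate+itertools.groupby(index-difference trick)+two extra passes with one direct run-tracking loop over the filtered hours that emits each range as it closes.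
import Mathlib
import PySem

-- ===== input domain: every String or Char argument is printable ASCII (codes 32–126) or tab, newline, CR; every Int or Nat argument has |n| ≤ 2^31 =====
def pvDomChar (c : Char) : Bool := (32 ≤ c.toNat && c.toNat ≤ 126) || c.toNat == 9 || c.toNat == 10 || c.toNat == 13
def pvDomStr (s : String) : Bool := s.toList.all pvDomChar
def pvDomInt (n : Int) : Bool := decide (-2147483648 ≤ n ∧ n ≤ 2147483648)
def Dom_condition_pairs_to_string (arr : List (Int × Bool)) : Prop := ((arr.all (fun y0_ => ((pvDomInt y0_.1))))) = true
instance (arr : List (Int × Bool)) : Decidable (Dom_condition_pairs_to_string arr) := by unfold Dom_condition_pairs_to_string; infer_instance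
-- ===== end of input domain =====

-- B changes the decomposition: one explicit run-tracking loop instead of enumerate + itertools.groupby
-- on the index-difference key + two further passes; same O(n) cost, same return value.

-- ===== PORT A =====
-- itertools.groupby(·, key = value - index): split into maximal chunks of consecutive equal keys.
def pvChunks : List (Int × Int) → List (List (Int × Int))
  | [] => []
  | [x] => [[x]]
  | x :: y :: xs =>
    if x.2 - x.1 = y.2 - y.1 then
      match pvChunks (y :: xs) with
      | g :: gs => (x :: g) :: gs
      | [] => [[x]]   -- unreachable: pvChunks of a nonempty list is nonempty
    else [x] :: pvChunks (y :: xs)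

def condition_pairs_to_string (arr : List (Int × Bool)) : String :=
  let good_hours := (arr.filter (fun p => p.2 == true)).map (·.1)
  -- groupby yields nonempty groups b, so b[0] / b[-1] are exactly headD / getLastD here
  let pairs := (pvChunks (PySem.List.enumerate good_hours)).map
      (fun b => ((b.headD (0, 0)).2, (b.getLastD (0, 0)).2))
  let rv := pairs.map (fun t =>
      if t.1 = t.2 then PySem.Int.toStr t.1
      else PySem.Int.toStr t.1 ++ "-" ++ PySem.Int.toStr t.2)
  PySem.Str.join ", " rv

-- ===== PORT B =====
def pvFmt (start prev : Int) : String :=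
  if start = prev then PySem.Int.toStr start
  else PySem.Int.toStr start ++ "-" ++ PySem.Int.toStr prev

def pvRunLoop (start prev : Int) (rv : List String) : List Int → List String
  | [] => rv ++ [pvFmt start prev]
  | h :: t =>
    if h ≠ prev + 1 then pvRunLoop h h (rv ++ [pvFmt start prev]) t
    else pvRunLoop start h rv t

def condition_pairs_to_string_alt (arr : List (Int × Bool)) : String :=
  let good_hours := (arr.filter (fun p => p.2 == true)).map (·.1)
  match good_hours with
  | [] => ""
  | g :: gs => PySem.Str.join ", " (pvRunLoop g g [] gs)

-- ===== PRECONDITION & SPEC =====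
def Spec_condition_pairs_to_string (arr : List (Int × Bool)) (out : String) : Prop := out = condition_pairs_to_string_alt arr
instance (arr : List (Int × Bool)) (out : String) : Decidable (Spec_condition_pairs_to_string arr out) := by unfold Spec_condition_pairs_to_string; infer_instance

-- ===== CLAIM (what is proved, stated in full; the proofs are below) =====
def Claim_equal_condition_pairs_to_string : Prop := ∀ (arr : List (Int × Bool)), Dom_condition_pairs_to_string arr → Spec_condition_pairs_to_string arr (condition_pairs_to_string arr)

-- ===== LEMMAS AND PROOFS =====

-- Common pure recursion both ports are reduced to.
def pvS (start prev : Int) : List Int → List String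
  | [] => [pvFmt start prev]
  | h :: t => if h = prev + 1 then pvS start h t else pvFmt start prev :: pvS h h t

-- end of the current run / strings emitted after the current run
def pvE (prev : Int) : List Int → Int
  | [] => prev
  | h :: t => if h = prev + 1 then pvE h t else prev

def pvR (prev : Int) : List Int → List String
  | [] => []
  | h :: t => if h = prev + 1 then pvR h t else pvS h h t

theorem pvS_decomp (t : List Int) : ∀ start prev : Int,
    pvS start prev t = pvFmt start (pvE prev t) :: pvR prev t := by
  induction t with
  | nil => intro s p; simp [pvS, pvE, pvR]
  | cons h t ih =>
    intro s p
    by_cases hc : h = p + 1 <;> simp [pvS, pvE, pvR, hc, ih]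

theorem pvRunLoop_append (t : List Int) : ∀ start prev rv,
    pvRunLoop start prev rv t = rv ++ pvS start prev t := by
  induction t with
  | nil => intro s p rv; simp [pvRunLoop, pvS]
  | cons h t ih =>
    intro s p rv
    by_cases hc : h = p + 1 <;> simp [pvRunLoop, pvS, hc, ih]

def pvFmtPair (b : List (Int × Int)) : String :=
  if (b.headD (0, 0)).2 = (b.getLastD (0, 0)).2 then PySem.Int.toStr (b.headD (0, 0)).2
  else PySem.Int.toStr (b.headD (0, 0)).2 ++ "-" ++ PySem.Int.toStr (b.getLastD (0, 0)).2

theorem pvChunks_main (t : List Int) : ∀ i prev : Int,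
    ∃ g gs, pvChunks ((i, prev) :: PySem.List.enumerate t (i + 1)) = g :: gs ∧
      g ≠ [] ∧ (g.headD (0, 0)).2 = prev ∧ (g.getLastD (0, 0)).2 = pvE prev t ∧
      gs.map pvFmtPair = pvR prev t := by
  induction t with
  | nil =>
    intro i p
    exact ⟨[(i, p)], [], by simp [PySem.List.enumerate, pvChunks, pvE, pvR]⟩
  | cons h t ih =>
    intro i p
    rw [PySem.List.enumerate_cons]
    by_cases hc : h = p + 1
    · obtain ⟨g, gs, hch, hne, hhd, hlast, hmap⟩ := ih (i + 1) h
      refine ⟨(i, p) :: g, gs, ?_, by simp, by simp, ?_, ?_⟩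
      · show pvChunks ((i, p) :: (i + 1, h) :: PySem.List.enumerate t (i + 1 + 1)) = _
        rw [pvChunks]
        · have : p - i = h - (i + 1) := by omega
          rw [if_pos this, hch]
      · have he : pvE p (h :: t) = pvE h t := by simp [pvE, hc]
        rw [he]
        rcases g with _ | ⟨x, g'⟩
        · exact absurd rfl hne
        · simpa [List.getLastD_cons] using hlast
      · simp [pvR, hc, hmap]
    · obtain ⟨g, gs, hch, hne, hhd, hlast, hmap⟩ := ih (i + 1) h
      refine ⟨[(i, p)], g :: gs, ?_, by simp, by simp, ?_, ?_⟩
      · show pvChunks ((i, p) :: (i + 1, h) :: PySem.List.enumerate t (i + 1 + 1)) = _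
        rw [pvChunks]
        · have : ¬ (p - i = h - (i + 1)) := by omega
          rw [if_neg this, hch]
      · simp [pvE, hc]
      · rw [List.map_cons, hmap,
          show pvR p (h :: t) = pvS h h t from by simp [pvR, hc], pvS_decomp]
        congr 1
        unfold pvFmtPair pvFmt
        rw [hhd, hlast]


theorem ports_agree (arr : List (Int × Bool)) :
    condition_pairs_to_string arr = condition_pairs_to_string_alt arr := by
  unfold condition_pairs_to_string condition_pairs_to_string_alt
  cases hg : (arr.filter (fun p => p.2 == true)).map (·.1) with
  | nil => simp [PySem.List.enumerate, pvChunks, PySem.Str.join]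
  | cons g gs =>
    simp only
    rw [pvRunLoop_append, pvS_decomp]
    have h0 : PySem.List.enumerate (g :: gs) 0 = (0, g) :: PySem.List.enumerate gs (0 + 1) := by
      rw [PySem.List.enumerate_cons]
    rw [h0]
    obtain ⟨c, cs, hch, hne, hhd, hlast, hmap⟩ := pvChunks_main gs 0 g
    rw [hch, List.nil_append]
    congr 1
    rw [List.map_cons, List.map_cons]
    congr 1
    · show pvFmtPair c = pvFmt g (pvE g gs)
      unfold pvFmtPair pvFmt
      rw [hhd, hlast]
    · rw [List.map_map]
      exact hmap

-- ===== VERDICT (by name: the statement is the Claim_ definition above) =====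
theorem condition_pairs_to_string_spec : Claim_equal_condition_pairs_to_string := by
  intro arr _
  exact ports_agree arr
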